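-- pv_equiv track=rewrite | github.com/DocDux/Dux-ITM-Repository | Hamo_Set_4 - Resubmission.py | telephone_cipher
-- ===== SOURCE A (Python) =====
-- encoder_dict = {
--         " ":"0",
--         "A":"2",
--         "B":"22",
--         "C":"222",
--         "D":"3",
--         "E":"33",
--         "F":"333",
--         "G":"4",
--         "H":"44",
--         "I":"444",
--         "J":"5",
--         "K":"55",
--         "L":"555",
--         "M":"6",
--         "N":"66",
--         "O":"666",
--         "P":"7",
--         "Q":"77",
--         "R":"777",
--         "S":"7777",
--         "T":"8",
--         "U":"88",
--         "V":"888",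
--         "W":"9",
--         "X":"99",
--         "Y":"999",
--         "Z":"9999"
--     }
--
-- def telephone_cipher(message):
--     '''
--     Before, when phones did not have touchscreen keypads,
--     the way to input letters was to click the physical keypads
--     repeatedly.
--
--     For example:
--     Clicking "222" will result in the letter C.
--     Clicking "7777" will result in the letter S.
--     and so on
--
--     To read more about it, you may visit the following link:
--     Telephone Keypad: https://en.wikipedia.org/wiki/Keypad
--
--     Using the `encoder_dict` in "set_4_given.py",
--     your task is to convert a letter string into its equivalent
--     numerical string as typed in a Telephone Keypad.
--
--     Note: In the case of text inputs like "ABC", to demarcate the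
--     same letters, an underscore "_" is placed in between.
--
--     Examples:
--     telephone_cipher("ABC") -> "2_22_222"
--     telephone_cipher("HELLO WORLD") -> "4433555_555666096667775553"
--     telephone_cipher("TEST") -> "83377778"
--     telephone_cipher("HOW DO YOU DO") -> "4466690366609996668803666"
--     telephone_cipher("ABRACADABRA") -> "2_227772_222_232_227772"
--
--     Parameters
--     ----------
--     message: str
--         the text string consisting of capital letters
--
--     Returns
--     -------
--     str
--         the equivalent numerical string typed in a Telephone Keypad
--         with underscores demarcating characters who share the same key
--     '''
--     # Replace `pass` with your code.
--     # Stay within the function. Only use the parameters as input. The function should return your answer.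
--
--     #accumulator variable
--     tele_cipher = ""
--     counter = 0
--
--     # cipher
--     for letter in message:
--         encoder_number = encoder_dict[letter]
--         tele_cipher += encoder_number
--
--         # demarcating
--         # checks if we are not at the last character of the message. if we don't have this, program can go out of bounds
--         if counter < len(message) - 1:
--             # gets the encoding "value" of the next letter
--             encoder_next_number = encoder_dict[message[(counter+1)]]
--             # if the current letter and the next letter use the same key, they will have the same starting numbers
--             if encoder_number[0] == encoder_next_number[0]:
--                 tele_cipher += "_"
--
--         counter += 1
--
--     return tele_cipher
-- ===== SOURCE B (Python) =====
-- # B derives keypad codes from the physical keypad layout (digit -> letters)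
-- # instead of the letter->code dict, and builds the output by grouping the
-- # message into maximal runs of same-key characters, joining each run with "_".
-- _KEYS = ["", "", "ABC", "DEF", "GHI", "JKL", "MNO", "PQRS", "TUV", "WXYZ"]
--
-- def telephone_cipher(message):
--     runs = []            # each run: codes of consecutive letters on the same key
--     last_digit = None
--     for ch in message:
--         if ch == " ":
--             digit, presses = "0", 1
--         else:
--             for d, letters in enumerate(_KEYS):
--                 if ch in letters:
--                     digit, presses = str(d), letters.index(ch) + 1
--                     break
--             else:
--                 raise KeyError(ch)
--         code = digit * presses
--         if digit == last_digit:
--             runs[-1].append(code)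
--         else:
--             runs.append([code])
--         last_digit = digit
--     return "".join("_".join(run) for run in runs)
-- ===== Notes on version B (the rewrite author's own statement) =====
-- stated objective: alternative
-- what changed: B discards the letter->code dict entirely: it derives each code from the physical keypad layout (digit -> letters list, presses = position+1), and produces the output by grouping the message into maximal runs of same-key characters and joining each run's codes with '_', instead of A's single pass that looks ahead at the next letter's dict code.
import Mathlib
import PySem

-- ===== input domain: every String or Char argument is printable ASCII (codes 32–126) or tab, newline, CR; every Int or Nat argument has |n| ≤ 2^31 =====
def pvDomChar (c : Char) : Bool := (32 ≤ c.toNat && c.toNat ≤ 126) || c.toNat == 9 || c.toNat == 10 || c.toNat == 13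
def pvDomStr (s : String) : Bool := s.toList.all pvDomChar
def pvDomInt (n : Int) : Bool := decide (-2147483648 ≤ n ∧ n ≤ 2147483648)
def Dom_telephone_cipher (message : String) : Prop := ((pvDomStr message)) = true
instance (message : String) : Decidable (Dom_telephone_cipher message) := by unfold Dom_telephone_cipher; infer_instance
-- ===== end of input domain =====

-- B replaces A's dict-lookup pass with look-ahead by a layout-derived encoding
-- (keypad digit -> letters, presses = position + 1) plus grouping into maximal
-- same-key runs joined with "_" (objective: alternative, same cost).

-- ===== PORT A =====
-- Module-level constant of the Python file (single-character string keys are Char,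
-- code strings are kept as List Char so every operation stays kernel-transparent).
def encoder_dict : PySem.Dict Char (List Char) := PySem.Dict.ofList
  [(' ', ['0']),
   ('A', ['2']), ('B', ['2','2']), ('C', ['2','2','2']),
   ('D', ['3']), ('E', ['3','3']), ('F', ['3','3','3']),
   ('G', ['4']), ('H', ['4','4']), ('I', ['4','4','4']),
   ('J', ['5']), ('K', ['5','5']), ('L', ['5','5','5']),
   ('M', ['6']), ('N', ['6','6']), ('O', ['6','6','6']),
   ('P', ['7']), ('Q', ['7','7']), ('R', ['7','7','7']), ('S', ['7','7','7','7']),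
   ('T', ['8']), ('U', ['8','8']), ('V', ['8','8','8']),
   ('W', ['9']), ('X', ['9','9']), ('Y', ['9','9','9']), ('Z', ['9','9','9','9'])]

-- encoder_dict[c]; the default [] is unreachable under Pre_ (Python raises KeyError there)
def pvEnc (c : Char) : List Char := (encoder_dict.get? c).getD []

-- the body of A's for-loop, on state (tele_cipher, counter); `chars` is the whole message
def pvStepA (chars : List Char) (st : List Char × Int) (letter : Char) : List Char × Int :=
  let tele := st.1
  let counter := st.2
  let encoder_number := pvEnc letter
  let tele := tele ++ encoder_number
  let tele :=
    if counter < (chars.length : Int) - 1 then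
      -- message[(counter+1)] is in range here; the ' ' default is never used
      let encoder_next_number := pvEnc ((PySem.List.pyGet? chars (counter + 1)).getD ' ')
      if PySem.List.pyGet? encoder_number 0 = PySem.List.pyGet? encoder_next_number 0 then
        tele ++ ['_']
      else tele
    else tele
  (tele, counter + 1)

def telephone_cipher (message : String) : String :=
  let chars := message.toList
  String.ofList (chars.foldl (pvStepA chars) ([], 0)).1

-- ===== PORT B =====
-- module-level _KEYS of Source B: keypad layout, index = digit
def pvKEYS : List (List Char) :=
  [[], [], ['A','B','C'], ['D','E','F'], ['G','H','I'], ['J','K','L'],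
   ['M','N','O'], ['P','Q','R','S'], ['T','U','V'], ['W','X','Y','Z']]

-- Source B's 'for d, letters in enumerate(_KEYS): if ch in letters: … break' search;
-- str(d) is exact as Char.ofNat (48 + d) since d ≤ 9 here
def pvFindKey (c : Char) : Nat → List (List Char) → Option (Char × Nat)
  | _, [] => none
  | d, letters :: rest =>
    if letters.contains c then
      some (Char.ofNat (48 + d), ((PySem.List.index? letters c).getD 0) + 1)
    else pvFindKey c (d + 1) rest

-- (digit, presses) for one character; none = Source B raises KeyError (outside Pre_)
def pvDig (c : Char) : Option (Char × Nat) :=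
  if c = ' ' then some ('0', 1) else pvFindKey c 0 pvKEYS

-- body of Source B's for-loop, on state (runs, last_digit)
def pvStepB (st : List (List (List Char)) × Option Char) (ch : Char) :
    List (List (List Char)) × Option Char :=
  match pvDig ch with
  | none => st   -- Source B raises KeyError here; unreachable under Pre_
  | some (digit, presses) =>
    let code := List.replicate presses digit   -- digit * presses
    let runs := st.1
    let runs :=
      if some digit = st.2 then
        runs.dropLast ++ [(runs.getLast?.getD []) ++ [code]]   -- runs[-1].append(code)
      else runs ++ [[code]]
    (runs, some digit)

def telephone_cipher_alt (message : String) : String :=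
  let st := message.toList.foldl pvStepB ([], none)
  String.ofList (PySem.Chars.join [] (st.1.map (PySem.Chars.join ['_'])))

-- ===== PRECONDITION & SPEC =====
-- the keys of encoder_dict, as a literal list
def pvKeyChars : List Char :=
  [' ','A','B','C','D','E','F','G','H','I','J','K','L','M','N','O','P','Q','R','S','T','U','V','W','X','Y','Z']

-- Pre_ excludes exactly the messages containing a character that is not a key of
-- encoder_dict (neither ' ' nor 'A'..'Z'): there both Pythons raise KeyError.
def Pre_telephone_cipher (message : String) : Prop :=
  (message.toList.all (fun c => pvKeyChars.contains c)) = true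
instance (message : String) : Decidable (Pre_telephone_cipher message) := by
  unfold Pre_telephone_cipher; infer_instance

def pvWitness_telephone_cipher : String := "HELLO WORLD"

def Spec_telephone_cipher (message : String) (out : String) : Prop := out = telephone_cipher_alt message
instance (message : String) (out : String) : Decidable (Spec_telephone_cipher message out) := by unfold Spec_telephone_cipher; infer_instance

-- ===== CLAIM (what is proved, stated in full; the proofs are below) =====
def Claim_equal_telephone_cipher : Prop := ∀ (message : String), Dom_telephone_cipher message → Pre_telephone_cipher message → Spec_telephone_cipher message (telephone_cipher message)

-- ===== LEMMAS AND PROOFS =====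

-- reference shape of the output, on the list of codes
def pvGoT : List Char → List (List Char) → List Char
  | _, [] => []
  | c, d :: r =>
    (if PySem.List.pyGet? c 0 = PySem.List.pyGet? d 0 then ['_'] else []) ++ d ++ pvGoT d r

def pvGo : List (List Char) → List Char
  | [] => []
  | c :: r => c ++ pvGoT c r

-- admitted characters (the keys of encoder_dict)
def pvAdm (c : Char) : Prop := (pvKeyChars.contains c) = true

-- for every admitted character, B's layout search agrees with A's dict code
def pvGoodB (c : Char) : Bool :=
  match pvDig c with
  | some (d, n) => (List.replicate n d == pvEnc c) && (PySem.List.pyGet? (pvEnc c) 0 == some d)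
  | none => false

set_option maxRecDepth 10000 in
theorem all_good : ∀ c ∈ pvKeyChars, pvGoodB c = true := by
  intro c hc
  fin_cases hc <;> decide

theorem good_spec (c : Char) (h : pvAdm c) :
    ∃ d n, pvDig c = some (d, n) ∧ List.replicate n d = pvEnc c ∧
      PySem.List.pyGet? (pvEnc c) 0 = some d := by
  have hmem : c ∈ pvKeyChars := by
    simpa [pvAdm] using h
  have hg := all_good c hmem
  unfold pvGoodB at hg
  cases hd : pvDig c with
  | none => rw [hd] at hg; simp at hg
  | some p =>
    rw [hd] at hg
    obtain ⟨d, n⟩ := p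
    simp only [Bool.and_eq_true, beq_iff_eq] at hg
    exact ⟨d, n, rfl, hg.1, hg.2⟩

theorem join_nil_eq_flatten (ps : List (List Char)) :
    PySem.Chars.join [] ps = ps.flatten := by
  induction ps with
  | nil => rfl
  | cons a t ih =>
    cases t with
    | nil => simp [PySem.Chars.join_singleton]
    | cons b u => simp_all [PySem.Chars.join_cons_cons]

theorem join_append_singleton (s q : List Char) (ps : List (List Char)) (h : ps ≠ []) :
    PySem.Chars.join s (ps ++ [q]) = PySem.Chars.join s ps ++ s ++ q := by
  induction ps with
  | nil => exact absurd rfl h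
  | cons a t ih =>
    cases t with
    | nil => simp [PySem.Chars.join_cons_cons, PySem.Chars.join_singleton]
    | cons b u =>
      simp only [List.cons_append, PySem.Chars.join_cons_cons]
      rw [show (b :: (u ++ [q])) = (b :: u) ++ [q] from rfl, ih (by simp)]
      simp

-- rendering of the runs accumulator: "".join("_".join(run) for run in runs)
def pvRender (rs : List (List (List Char))) : List Char :=
  (rs.map (PySem.Chars.join ['_'])).flatten

theorem A_fold (full : List Char) (todo : List Char) (acc : List Char) (k : Nat)
    (h : full.drop k = todo) :
    (todo.foldl (pvStepA full) (acc, (k : Int))).1 = acc ++ pvGo (todo.map pvEnc) := by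
  induction todo generalizing acc k with
  | nil => simp [pvGo]
  | cons c t ih =>
    have hlenk := congrArg List.length h
    rw [List.length_drop] at hlenk
    simp only [List.length_cons] at hlenk
    have hk : k < full.length := by omega
    have hlen : full.length = k + 1 + t.length := by omega
    have hstep : full.drop (k + 1) = t := by
      have := congrArg List.tail h
      rw [List.tail_drop] at this
      simpa using this
    have hnext : PySem.List.pyGet? full ((k : Int) + 1) = t.head? := by
      have h0 : full[k + 1]? = t[0]? := by
        rw [← hstep]; simp [List.getElem?_drop]
      have hcast : ((k : Int) + 1) = ((k + 1 : Nat) : Int) := by push_cast; ring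
      rw [hcast, PySem.List.pyGet?_natCast, h0, List.head?_eq_getElem?]
    have hcast1 : ((k : Int) + 1) = ((k + 1 : Nat) : Int) := by push_cast; ring
    cases t with
    | nil =>
      simp only [List.length_nil] at hlen
      have hcond : ¬ ((k : Int) < (full.length : Int) - 1) := by omega
      simp [List.foldl_cons, pvStepA, hcond, pvGo, pvGoT]
    | cons d t' =>
      simp only [List.length_cons] at hlen
      have hcond : (k : Int) < (full.length : Int) - 1 := by omega
      by_cases hfd : PySem.List.pyGet? (pvEnc c) 0 = PySem.List.pyGet? (pvEnc d) 0
      · have hsa : pvStepA full (acc, (k : Int)) c =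
            (acc ++ pvEnc c ++ ['_'], (k : Int) + 1) := by
          simp [pvStepA, hcond, hnext, hfd]
        rw [List.foldl_cons, hsa, hcast1, ih _ _ hstep]
        simp [pvGo, pvGoT, hfd]
      · have hsa : pvStepA full (acc, (k : Int)) c =
            (acc ++ pvEnc c, (k : Int) + 1) := by
          simp [pvStepA, hcond, hnext, hfd]
        rw [List.foldl_cons, hsa, hcast1, ih _ _ hstep]
        simp [pvGo, pvGoT, hfd]

theorem render_append_run (init : List (List (List Char))) (lr : List (List Char)) :
    pvRender (init ++ [lr]) = pvRender init ++ PySem.Chars.join ['_'] lr := by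
  simp [pvRender]

theorem B_fold (t : List Char) (p : Char) (init : List (List (List Char)))
    (lr : List (List Char))
    (ht : ∀ c ∈ t, pvAdm c) (hp : pvAdm p) (hlr : lr ≠ []) :
    pvRender ((t.foldl pvStepB (init ++ [lr], (pvDig p).map (·.1))).1)
      = pvRender (init ++ [lr]) ++ pvGoT (pvEnc p) (t.map pvEnc) := by
  induction t generalizing p init lr with
  | nil => simp [pvGoT]
  | cons c t' ih =>
    obtain ⟨dp, np, hdp, _, hhp⟩ := good_spec p hp
    obtain ⟨dc, nc, hdc, hrep, hhc⟩ := good_spec c (ht c (by simp))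
    have ht' : ∀ x ∈ t', pvAdm x := fun x hx => ht x (by simp [hx])
    rw [List.foldl_cons]
    by_cases hd : dc = dp
    · -- same key: code appended to the last run; pvGoT inserts '_'
      have hcond : PySem.List.pyGet? (pvEnc p) 0 = PySem.List.pyGet? (pvEnc c) 0 := by
        rw [hhp, hhc, hd]
      have hstep : pvStepB (init ++ [lr], (pvDig p).map (·.1)) c =
          (init ++ [lr ++ [pvEnc c]], some dc) := by
        simp [pvStepB, hdc, hdp, ← hd, hrep]
      rw [hstep]
      have hcast : (some dc : Option Char) = (pvDig c).map (·.1) := by simp [hdc]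
      rw [hcast, ih c init (lr ++ [pvEnc c]) ht' (ht c (by simp)) (by simp)]
      rw [render_append_run, render_append_run, join_append_singleton _ _ _ hlr]
      simp [pvGoT, hcond]
    · -- new key: a fresh run is opened; pvGoT inserts no '_'
      have hcond : ¬ (PySem.List.pyGet? (pvEnc p) 0 = PySem.List.pyGet? (pvEnc c) 0) := by
        rw [hhp, hhc]; simp [Ne.symm hd]
      have hstep : pvStepB (init ++ [lr], (pvDig p).map (·.1)) c =
          ((init ++ [lr]) ++ [[pvEnc c]], some dc) := by
        simp [pvStepB, hdc, hdp, hd, hrep]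
      rw [hstep]
      have hcast : (some dc : Option Char) = (pvDig c).map (·.1) := by simp [hdc]
      rw [hcast, ih c (init ++ [lr]) [pvEnc c] ht' (ht c (by simp)) (by simp)]
      rw [render_append_run, PySem.Chars.join_singleton]
      simp [pvGoT, hcond]

-- ===== VERDICT (by name: the statement is the Claim_ definition above) =====
theorem telephone_cipher_spec : Claim_equal_telephone_cipher := by
  intro message _ hpre
  unfold Spec_telephone_cipher telephone_cipher telephone_cipher_alt
  have hA := A_fold message.toList message.toList [] 0 (by simp)
  simp only [Nat.cast_zero] at hA
  simp only [hA, List.nil_append]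
  unfold Pre_telephone_cipher at hpre
  rw [List.all_eq_true] at hpre
  rw [join_nil_eq_flatten]
  cases hm : message.toList with
  | nil => simp [pvGo]
  | cons c t =>
    have hadm : ∀ x ∈ c :: t, pvAdm x := by
      intro x hx; exact hpre x (by rw [hm]; exact hx)
    obtain ⟨dc, nc, hdc, hrep, _⟩ := good_spec c (hadm c (by simp))
    have hfirst : pvStepB ([], none) c = ([[pvEnc c]], some dc) := by
      simp [pvStepB, hdc, hrep]
    rw [List.foldl_cons, hfirst]
    have hcast : (some dc : Option Char) = (pvDig c).map (·.1) := by simp [hdc]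
    have hB := B_fold t c [] [pvEnc c]
      (fun x hx => hadm x (by simp [hx])) (hadm c (by simp)) (by simp)
    simp only [pvRender, List.nil_append, List.map_cons, List.map_nil, List.flatten_cons,
      List.flatten_nil, List.append_nil, PySem.Chars.join_singleton] at hB
    rw [hcast, hB]
    simp [pvGo]
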